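-- pv_equiv track=rewrite | github.com/4ier/ca-sound | sorting.py | quicksort_trace
-- ===== SOURCE A (Python) =====
-- def quicksort_trace(arr):
--     """Quicksort returning list of (pivot_val, partition_left, partition_right, depth, array_snapshot)."""
--     a = arr.copy()
--     trace = []
--
--     def qs(lo, hi, depth):
--         if lo >= hi:
--             return
--         pivot = a[hi]
--         i = lo
--         for j in range(lo, hi):
--             if a[j] <= pivot:
--                 a[i], a[j] = a[j], a[i]
--                 i += 1
--         a[i], a[hi] = a[hi], a[i]
--         trace.append((pivot, lo, hi, depth, a.copy()))
--         qs(lo, i - 1, depth + 1)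
--         qs(i + 1, hi, depth + 1)
--
--     qs(0, len(a) - 1, 0)
--     return trace
-- ===== SOURCE B (Python) =====
-- def quicksort_trace(arr):
--     """Quicksort returning list of (pivot_val, partition_left, partition_right, depth, array_snapshot)."""
--     a = arr.copy()
--     trace = []
--     stack = [(0, len(a) - 1, 0)]
--     while stack:
--         lo, hi, depth = stack.pop()
--         if lo >= hi:
--             continue
--         pivot = a[hi]
--         i = lo
--         for j in range(lo, hi):
--             if a[j] <= pivot:
--                 a[i], a[j] = a[j], a[i]
--                 i += 1
--         a[i], a[hi] = a[hi], a[i]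
--         trace.append((pivot, lo, hi, depth, a.copy()))
--         stack.append((i + 1, hi, depth + 1))
--         stack.append((lo, i - 1, depth + 1))
--     return trace
-- ===== Notes on version B (the rewrite author's own statement) =====
-- stated objective: alternative
-- what changed: The recursive helper qs(lo,hi,depth) is replaced by an iterative loop over an explicit LIFO stack of (lo,hi,depth) frames, pushing the right subrange before the left so the pre-order trace and snapshots are identical.
import Mathlib
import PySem

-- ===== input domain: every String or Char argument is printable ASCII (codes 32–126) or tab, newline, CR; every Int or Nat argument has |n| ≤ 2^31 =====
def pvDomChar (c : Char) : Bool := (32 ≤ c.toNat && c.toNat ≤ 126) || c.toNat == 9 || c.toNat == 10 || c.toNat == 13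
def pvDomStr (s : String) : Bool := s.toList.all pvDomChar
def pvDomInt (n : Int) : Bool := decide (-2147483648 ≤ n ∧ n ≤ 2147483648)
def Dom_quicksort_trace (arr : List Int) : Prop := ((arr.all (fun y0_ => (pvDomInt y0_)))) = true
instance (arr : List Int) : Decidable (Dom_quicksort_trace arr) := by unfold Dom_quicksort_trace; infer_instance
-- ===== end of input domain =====

-- B replaces A's recursive helper by an explicit LIFO stack of (lo,hi,depth) frames
-- (right subrange pushed first), same Lomuto partition; objective: alternative decomposition.

-- Shared helper: the simultaneous assignment a[i], a[j] = a[j], a[i] (indices always in range here,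
-- so the total pySetD/pyGetD forms are exact).
def pvSwap (a : List Int) (i j : Int) : List Int :=
  PySem.List.pySetD (PySem.List.pySetD a i (PySem.List.pyGetD a j 0)) j (PySem.List.pyGetD a i 0)

-- Shared helper: 'pivot = a[hi]; i = lo; for j in range(lo, hi): if a[j] <= pivot: swap; i += 1',
-- written identically in both Pythons; returns the final (a, i).  (a is not mutated at index hi
-- by the loop in Python either, so reading the pivot from the unchanged parameter a is exact.)
def pvPartition (a : List Int) (lo hi : Int) : List Int × Int :=
  (PySem.List.pyRange lo hi 1).foldl
    (fun (s : List Int × Int) j =>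
      if PySem.List.pyGetD s.1 j 0 ≤ PySem.List.pyGetD a hi 0 then (pvSwap s.1 s.2 j, s.2 + 1) else s)
    (a, lo)

-- Shared helper: one partition step = Lomuto scan, final swap a[i],a[hi]=a[hi],a[i], and the
-- appended trace entry; returns (new a, new trace, i).  Both Pythons contain this code verbatim.
def pvStep (a : List Int) (trace : List (Int × Int × Int × Int × List Int)) (lo hi depth : Int) :
    List Int × List (Int × Int × Int × Int × List Int) × Int :=
  let p := pvPartition a lo hi
  let a1 := pvSwap p.1 p.2 hi
  (a1, trace ++ [(PySem.List.pyGetD a hi 0, lo, hi, depth, a1)], p.2)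

-- i never moves below its start nor past the end of the scanned range (used for termination).
theorem pvPartition_snd_bounds (a : List Int) (lo hi : Int) (hlo : lo ≤ hi) :
    lo ≤ (pvPartition a lo hi).2 ∧ (pvPartition a lo hi).2 ≤ hi := by
  have key : ∀ (l : List Int) (s : List Int × Int),
      s.2 ≤ (l.foldl (fun (s : List Int × Int) j =>
        if PySem.List.pyGetD s.1 j 0 ≤ PySem.List.pyGetD a hi 0 then (pvSwap s.1 s.2 j, s.2 + 1) else s) s).2 ∧
      (l.foldl (fun (s : List Int × Int) j =>
        if PySem.List.pyGetD s.1 j 0 ≤ PySem.List.pyGetD a hi 0 then (pvSwap s.1 s.2 j, s.2 + 1) else s) s).2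
        ≤ s.2 + l.length := by
    intro l
    induction l with
    | nil => intro s; simp
    | cons x xs ih =>
      intro s
      rw [List.foldl_cons, List.length_cons]
      by_cases h : PySem.List.pyGetD s.1 x 0 ≤ PySem.List.pyGetD a hi 0
      · rw [if_pos h]
        obtain ⟨i1, i2⟩ := ih (pvSwap s.1 s.2 x, s.2 + 1)
        generalize ((List.foldl _ _ xs : List Int × Int)).2 = r at i1 i2
        constructor
        · exact le_trans (by omega) i1
        · refine le_trans i2 ?_
          push_cast
          omega
      · rw [if_neg h]
        obtain ⟨i1, i2⟩ := ih s
        generalize ((List.foldl _ _ xs : List Int × Int)).2 = r at i1 i2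
        refine ⟨i1, le_trans i2 ?_⟩
        push_cast
        omega
  obtain ⟨h1, h2⟩ := key (PySem.List.pyRange lo hi 1) (a, lo)
  have hlen := PySem.List.length_pyRange_one lo hi
  rw [hlen] at h2
  unfold pvPartition
  generalize ((List.foldl _ _ _ : List Int × Int)).2 = r at h1 h2
  omega

theorem pvStep_idx (a : List Int) (trace : List (Int × Int × Int × Int × List Int))
    (lo hi depth : Int) : (pvStep a trace lo hi depth).2.2 = (pvPartition a lo hi).2 := rfl

-- Small index-arithmetic facts (proved by hand so the proof terms stay small).
theorem pvIdx1 (q lo hi : Int) (h2 : q ≤ hi) (h : ¬ lo ≥ hi) :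
    (q - 1 - lo).toNat < (hi - lo).toNat :=
  (Int.toNat_lt_toNat (Int.sub_pos.mpr (lt_of_not_ge h))).mpr
    (sub_lt_sub_right (lt_of_lt_of_le (sub_one_lt q) h2) lo)

theorem pvIdx2 (q lo hi : Int) (h1 : lo ≤ q) (h : ¬ lo ≥ hi) :
    (hi - (q + 1)).toNat < (hi - lo).toNat :=
  (Int.toNat_lt_toNat (Int.sub_pos.mpr (lt_of_not_ge h))).mpr
    (sub_lt_sub_left (Int.lt_add_one_iff.mpr h1) hi)

theorem pvIdxEq (q lo hi : Int) (h1 : lo ≤ q) (h2 : q ≤ hi) :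
    (q - 1 - lo + 1).toNat + (hi - (q + 1) + 1).toNat + 1 = (hi - lo + 1).toNat := by
  have e1 : q - 1 - lo + 1 = q - lo := by ring
  have e2 : hi - (q + 1) + 1 = hi - q := by ring
  have e3 : hi - lo + 1 = q - lo + (hi - q + 1) := by ring
  have n1 : (0 : Int) ≤ q - lo := Int.sub_nonneg.mpr h1
  have n2 : (0 : Int) ≤ hi - q := Int.sub_nonneg.mpr h2
  have n3 : (0 : Int) ≤ hi - q + 1 := add_nonneg n2 (by norm_num)
  rw [e1, e2, e3, Int.toNat_add n1 n3, Int.toNat_add n2 (by norm_num : (0 : Int) ≤ 1)]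
  exact Nat.add_assoc _ _ _

theorem pvIdxLe (q lo hi : Int) (h1 : lo ≤ q) (h2 : q ≤ hi) (h : ¬ lo ≥ hi) :
    1 ≤ (q - 1 - lo + 1).toNat + (hi - (q + 1) + 1).toNat := by
  have e1 : q - 1 - lo + 1 = q - lo := by ring
  have e2 : hi - (q + 1) + 1 = hi - q := by ring
  have n1 : (0 : Int) ≤ q - lo := Int.sub_nonneg.mpr h1
  have n2 : (0 : Int) ≤ hi - q := Int.sub_nonneg.mpr h2
  rw [e1, e2, ← Int.toNat_add n1 n2]
  have e4 : q - lo + (hi - q) = hi - lo := by ring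
  rw [e4]
  exact Nat.pos_of_ne_zero
    (fun hz => absurd (Int.toNat_eq_zero.mp hz) (not_le.mpr (Int.sub_pos.mpr (lt_of_not_ge h))))

-- Termination facts for the two ports (kept as named lemmas so the recursive
-- definitions carry only small proof terms).
theorem pvDecA1 (a : List Int) (trace : List (Int × Int × Int × Int × List Int))
    (lo hi depth : Int) (h : ¬ lo ≥ hi) :
    ((pvStep a trace lo hi depth).2.2 - 1 - lo).toNat < (hi - lo).toNat := by
  have hb := pvPartition_snd_bounds a lo hi (Int.le_of_lt (Int.lt_of_not_ge h))
  rw [pvStep_idx]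
  exact pvIdx1 (pvPartition a lo hi).2 lo hi hb.2 h

theorem pvDecA2 (a : List Int) (trace : List (Int × Int × Int × Int × List Int))
    (lo hi depth : Int) (h : ¬ lo ≥ hi) :
    (hi - ((pvStep a trace lo hi depth).2.2 + 1)).toNat < (hi - lo).toNat := by
  have hb := pvPartition_snd_bounds a lo hi (Int.le_of_lt (Int.lt_of_not_ge h))
  rw [pvStep_idx]
  exact pvIdx2 (pvPartition a lo hi).2 lo hi hb.1 h

-- ===== PORT A =====
-- A's inner recursive helper qs(lo, hi, depth), threading the mutable state (a, trace).
def pvQsA (a : List Int) (trace : List (Int × Int × Int × Int × List Int)) (lo hi depth : Int) :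
    List Int × List (Int × Int × Int × Int × List Int) :=
  if lo ≥ hi then (a, trace)
  else
    let s := pvStep a trace lo hi depth
    let r := pvQsA s.1 s.2.1 lo (s.2.2 - 1) (depth + 1)
    pvQsA r.1 r.2 (s.2.2 + 1) hi (depth + 1)
termination_by (hi - lo).toNat
decreasing_by
  · exact pvDecA1 a trace lo hi depth (by assumption)
  · exact pvDecA2 a trace lo hi depth (by assumption)

def quicksort_trace (arr : List Int) : List (Int × Int × Int × Int × List Int) :=
  (pvQsA arr [] 0 ((arr.length : Int) - 1) 0).2

-- ===== PORT B =====
-- 2^a + 2^b < 2^s when a + b + 1 = s and a + b ≥ 1 (for the stack loop's termination).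
theorem pvPowSplit (x y s : Nat) (h : x + y + 1 = s) (h1 : 1 ≤ x + y) :
    2 ^ x + 2 ^ y < 2 ^ s := by
  have hs2 : 2 ^ s = 2 ^ (x + y) + 2 ^ (x + y) := by
    rw [← h, pow_succ]
    ring
  rcases Nat.eq_zero_or_pos y with hy | hy
  · have a1 : 2 ^ y < 2 ^ (x + y) := by
      rw [hy, pow_zero]
      exact Nat.one_lt_two_pow_iff.mpr (by omega)
    have a2 : 2 ^ x ≤ 2 ^ (x + y) := Nat.pow_le_pow_right (by norm_num) (by omega)
    rw [hs2]
    exact Nat.add_lt_add_of_le_of_lt a2 a1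
  · have a1 : 2 ^ x < 2 ^ (x + y) := Nat.pow_lt_pow_right (by norm_num) (by omega)
    have a2 : 2 ^ y ≤ 2 ^ (x + y) := Nat.pow_le_pow_right (by norm_num) (by omega)
    rw [hs2]
    exact Nat.add_lt_add_of_lt_of_le a1 a2

theorem pvDecB1 (lo hi depth : Int) (rest : List (Int × Int × Int)) :
    ((rest.map (fun f => 2 ^ ((f.2.1 - f.1 + 1).toNat))).sum)
      < ((((lo, hi, depth) :: rest).map (fun f => 2 ^ ((f.2.1 - f.1 + 1).toNat))).sum) := by
  simp only [List.map_cons, List.sum_cons]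
  have h1 : 1 ≤ 2 ^ ((hi - lo + 1).toNat) := Nat.one_le_two_pow
  omega

theorem pvDecB2 (a : List Int) (trace : List (Int × Int × Int × Int × List Int))
    (lo hi depth : Int) (rest : List (Int × Int × Int)) (h : ¬ lo ≥ hi) :
    ((((lo, (pvStep a trace lo hi depth).2.2 - 1, depth + 1)
        :: ((pvStep a trace lo hi depth).2.2 + 1, hi, depth + 1) :: rest).map
          (fun f => 2 ^ ((f.2.1 - f.1 + 1).toNat))).sum)
      < ((((lo, hi, depth) :: rest).map (fun f => 2 ^ ((f.2.1 - f.1 + 1).toNat))).sum) := by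
  simp only [List.map_cons, List.sum_cons, pvStep_idx]
  have hb := pvPartition_snd_bounds a lo hi (Int.le_of_lt (Int.lt_of_not_ge h))
  generalize (pvPartition a lo hi).2 = q at hb ⊢
  generalize (List.map (fun f => 2 ^ ((f.2.1 - f.1 + 1).toNat)) rest).sum = S
  have hp := pvPowSplit ((q - 1 - lo + 1).toNat) ((hi - (q + 1) + 1).toNat)
    ((hi - lo + 1).toNat) (pvIdxEq q lo hi hb.1 hb.2) (pvIdxLe q lo hi hb.1 hb.2 h)
  rw [← Nat.add_assoc]
  exact Nat.add_lt_add_right hp S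

-- B's while loop: pop a (lo, hi, depth) frame, partition via the same pvStep, push right then
-- left.  Python pushes (i+1, hi) then (lo, i-1) and list.pop takes the LAST element, so the
-- head of this Lean stack list is the last-pushed frame (lo, i-1): the left subrange pops first.
def pvQsB (a : List Int) (trace : List (Int × Int × Int × Int × List Int))
    (stack : List (Int × Int × Int)) : List (Int × Int × Int × Int × List Int) :=
  match stack with
  | [] => trace
  | (lo, hi, depth) :: rest =>
    if lo ≥ hi then pvQsB a trace rest
    else
      let s := pvStep a trace lo hi depth
      pvQsB s.1 s.2.1 ((lo, s.2.2 - 1, depth + 1) :: (s.2.2 + 1, hi, depth + 1) :: rest)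
termination_by (stack.map (fun f => 2 ^ ((f.2.1 - f.1 + 1).toNat))).sum
decreasing_by
  · exact pvDecB1 lo hi depth rest
  · exact pvDecB2 a trace lo hi depth rest (by assumption)

def quicksort_trace_alt (arr : List Int) : List (Int × Int × Int × Int × List Int) :=
  pvQsB arr [] [(0, (arr.length : Int) - 1, 0)]

-- ===== PRECONDITION & SPEC =====
def Spec_quicksort_trace (arr : List Int) (out : List (Int × Int × Int × Int × List Int)) : Prop := out = quicksort_trace_alt arr
instance (arr : List Int) (out : List (Int × Int × Int × Int × List Int)) : Decidable (Spec_quicksort_trace arr out) := by unfold Spec_quicksort_trace; infer_instance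

-- ===== CLAIM (what is proved, stated in full; the proofs are below) =====
def Claim_equal_quicksort_trace : Prop := ∀ (arr : List Int), Dom_quicksort_trace arr → Spec_quicksort_trace arr (quicksort_trace arr)

-- ===== LEMMAS AND PROOFS =====

-- The stack machine run on a frame followed by any rest equals running A's recursion on that
-- frame and then continuing with the rest: B simulates A's pre-order traversal.
theorem pvQsB_simulates (a : List Int) (trace : List (Int × Int × Int × Int × List Int))
    (lo hi depth : Int) :
    ∀ rest, pvQsB a trace ((lo, hi, depth) :: rest)
      = pvQsB (pvQsA a trace lo hi depth).1 (pvQsA a trace lo hi depth).2 rest := by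
  fun_induction pvQsA a trace lo hi depth
  case case1 a t lo hi d h =>
    intro rest
    rw [pvQsB, if_pos h]
  case case2 hi d h s r ih1 ih1' ih2 =>
    intro rest
    rw [pvQsB, if_neg h]
    exact (ih1' _).trans (ih2 _)

theorem quicksort_trace_eq (arr : List Int) : quicksort_trace arr = quicksort_trace_alt arr := by
  unfold quicksort_trace quicksort_trace_alt
  rw [pvQsB_simulates]
  rw [pvQsB]

-- ===== VERDICT (by name: the statement is the Claim_ definition above) =====
theorem quicksort_trace_spec : Claim_equal_quicksort_trace := by
  intro arr _
  unfold Spec_quicksort_trace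
  exact quicksort_trace_eq arr
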